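-- pv_equiv track=rewrite | github.com/ZooWagon/PerF | case-study/2pc-ctp/test-script/fg-analyze.py | get_moni_stmt_from
-- ===== SOURCE A (Python) =====
-- def get_moni_stmt_from(lines, i):
--     j = i
--     while not lines[j].strip()[-1] == '>' :
--         j += 1
--     stmt = ""
--     for k in range(i, j + 1):
--         stmt += lines[k][0:-1].strip()
--         if k != j:
--             stmt += ' '
--     return stmt, j
-- ===== SOURCE B (Python) =====
-- def get_moni_stmt_from(lines, i):
--     # single accumulating pass: collect the pieces while scanning for the
--     # terminating '>' line, then join them once
--     j = i
--     parts = []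
--     while lines[j].strip()[-1] != '>':
--         parts.append(lines[j][0:-1].strip())
--         j += 1
--     parts.append(lines[j][0:-1].strip())
--     return ' '.join(parts), j
-- ===== Notes on version B (the rewrite author's own statement) =====
-- stated objective: simpler
-- what changed: A scans once to find the terminating line j and then re-loops over i..j concatenating with manual separator logic; B does a single accumulating pass that collects the stripped pieces while scanning and joins them once with ' '.join.
import Mathlib
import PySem

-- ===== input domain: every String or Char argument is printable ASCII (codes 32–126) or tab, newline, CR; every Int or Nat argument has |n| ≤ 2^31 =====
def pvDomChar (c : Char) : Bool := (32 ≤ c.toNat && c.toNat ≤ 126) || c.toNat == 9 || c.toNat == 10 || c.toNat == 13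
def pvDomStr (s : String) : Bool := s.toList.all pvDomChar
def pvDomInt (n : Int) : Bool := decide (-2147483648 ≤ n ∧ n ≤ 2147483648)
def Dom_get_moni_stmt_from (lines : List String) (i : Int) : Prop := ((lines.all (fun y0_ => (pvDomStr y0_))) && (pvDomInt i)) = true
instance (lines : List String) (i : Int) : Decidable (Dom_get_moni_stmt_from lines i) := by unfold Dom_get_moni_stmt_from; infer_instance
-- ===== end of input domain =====

-- B fuses A's two passes (find j, then re-loop i..j building the string) into one
-- accumulating pass that collects the pieces and joins them once; objective: simpler.

-- ===== PORT A =====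
-- lines[k][0:-1].strip()
def pvPiece (s : String) : String := PySem.Str.strip (PySem.Str.slice s (some 0) (some (-1)))
-- lines[j].strip()[-1]  (none = IndexError on an all-whitespace line)
def pvLastStrip (s : String) : Option Char := PySem.Str.pyGet? (PySem.Str.strip s) (-1)

-- 'while not lines[j].strip()[-1] == '>': j += 1' — returns the final j; none = IndexError.
-- Fuel 2*len+1 bounds the number of iterations Python can perform before returning or raising.
def pvFindJ (lines : List String) : Nat → Int → Option Int
  | 0, _ => none
  | f+1, j =>
    match PySem.List.pyGet? lines j with
    | none => none
    | some s =>
      match pvLastStrip s with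
      | none => none
      | some c => if c = '>' then some j else pvFindJ lines f (j+1)

def get_moni_stmt_from (lines : List String) (i : Int) : String × Int :=
  match pvFindJ lines (2*lines.length+1) i with
  | none => ("", 0)   -- Python raises here; excluded by Pre_
  | some j =>
    let stmt := (PySem.List.pyRange i (j+1) 1).foldl
      (fun stmt k =>
        let stmt := stmt ++ pvPiece (PySem.List.pyGetD lines k "")
        if k ≠ j then stmt ++ " " else stmt) ""
    (stmt, j)

-- ===== PORT B =====
-- the single accumulating while loop of Source B: scan for the '>' line, appending each
-- stripped piece to parts; none = IndexError (same raise points as A's scan).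
def pvGoB (lines : List String) : Nat → Int → List String → Option (String × Int)
  | 0, _, _ => none
  | f+1, j, parts =>
    match PySem.List.pyGet? lines j with
    | none => none
    | some s =>
      match pvLastStrip s with
      | none => none
      | some c =>
        if c = '>' then some (PySem.Str.join " " (parts ++ [pvPiece s]), j)
        else pvGoB lines f (j+1) (parts ++ [pvPiece s])

def get_moni_stmt_from_alt (lines : List String) (i : Int) : String × Int :=
  (pvGoB lines (2*lines.length+1) i []).getD ("", 0)

-- ===== PRECONDITION & SPEC =====
-- closed-form versions of the loop tests, for Pre_ only
def pvOkEnd (lines : List String) (j : Int) : Bool :=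
  match PySem.List.pyGet? lines j with
  | none => false
  | some s => PySem.Str.pyGet? (PySem.Str.strip s) (-1) == some '>'
def pvOkCont (lines : List String) (j : Int) : Bool :=
  match PySem.List.pyGet? lines j with
  | none => false
  | some s =>
    match PySem.Str.pyGet? (PySem.Str.strip s) (-1) with
    | none => false
    | some c => c != '>'

-- Pre_: Python returns normally iff, scanning from i, some in-range line whose strip ends
-- in '>' is reached before any IndexError (out-of-range index or all-whitespace line).
def Pre_get_moni_stmt_from (lines : List String) (i : Int) : Prop :=
  ∃ n ∈ List.range (2*lines.length+1),
    pvOkEnd lines (i + n) = true ∧ ∀ m ∈ List.range n, pvOkCont lines (i + m) = true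
instance (lines : List String) (i : Int) : Decidable (Pre_get_moni_stmt_from lines i) := by
  unfold Pre_get_moni_stmt_from; infer_instance

def pvWitness_get_moni_stmt_from : List String × Int := (["a b\n", "c >\n"], 0)

def Spec_get_moni_stmt_from (lines : List String) (i : Int) (out : String × Int) : Prop := out = get_moni_stmt_from_alt lines i
instance (lines : List String) (i : Int) (out : String × Int) : Decidable (Spec_get_moni_stmt_from lines i out) := by unfold Spec_get_moni_stmt_from; infer_instance

-- ===== CLAIM (what is proved, stated in full; the proofs are below) =====
def Claim_equal_get_moni_stmt_from : Prop := ∀ (lines : List String) (i : Int), Dom_get_moni_stmt_from lines i → Pre_get_moni_stmt_from lines i → Spec_get_moni_stmt_from lines i (get_moni_stmt_from lines i)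

-- ===== LEMMAS AND PROOFS =====

theorem pvGetD_of_get? {α : Type} (xs : List α) (i : Int) (d x : α)
    (h : PySem.List.pyGet? xs i = some x) : PySem.List.pyGetD xs i d = x := by
  simp [PySem.List.pyGetD, h]

-- A's build loop over i..j equals init ++ ' '.join of the pieces
theorem foldA (lines : List String) (b : Int) :
    ∀ (n : Nat) (a : Int) (init : String), (b - a).toNat = n → a ≤ b →
    (PySem.List.pyRange a (b+1) 1).foldl
      (fun stmt k =>
        let stmt := stmt ++ pvPiece (PySem.List.pyGetD lines k "")
        if k ≠ b then stmt ++ " " else stmt) init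
    = init ++ PySem.Str.join " "
        ((PySem.List.pyRange a (b+1) 1).map (fun k => pvPiece (PySem.List.pyGetD lines k ""))) := by
  intro n
  induction n with
  | zero =>
    intro a init hn hab
    have : a = b := by omega
    subst this
    rw [PySem.List.pyRange_one_singleton]
    apply String.ext
    simp [PySem.Str.toList_join, PySem.Chars.join_singleton]
  | succ n ih =>
    intro a init hn hab
    have hlt : a < b := by omega
    rw [PySem.List.pyRange_one_cons (by omega : a < b + 1)]
    simp only [List.foldl_cons, List.map_cons]
    have hne : a ≠ b := by omega
    rw [ih (a+1) _ (by omega) (by omega)]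
    simp only [if_pos hne]
    rw [PySem.List.pyRange_one_cons (by omega : a + 1 < b + 1)]
    apply String.ext
    simp [PySem.Str.toList_join, PySem.Chars.join_cons_cons]

-- one-step unfoldings of the two scans
theorem pvFindJ_succ (lines : List String) (f : Nat) (j : Int) :
    pvFindJ lines (f+1) j =
      match PySem.List.pyGet? lines j with
      | none => none
      | some s =>
        match pvLastStrip s with
        | none => none
        | some c => if c = '>' then some j else pvFindJ lines f (j+1) := rfl

theorem pvGoB_succ (lines : List String) (f : Nat) (j : Int) (parts : List String) :
    pvGoB lines (f+1) j parts =
      match PySem.List.pyGet? lines j with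
      | none => none
      | some s =>
        match pvLastStrip s with
        | none => none
        | some c =>
          if c = '>' then some (PySem.Str.join " " (parts ++ [pvPiece s]), j)
          else pvGoB lines f (j+1) (parts ++ [pvPiece s]) := rfl

-- relation between A's scan and B's accumulating scan
set_option maxHeartbeats 2000000 in
theorem findGo (lines : List String) :
    ∀ (f : Nat) (j : Int) (parts : List String),
    (pvFindJ lines f j = none → pvGoB lines f j parts = none) ∧
    (∀ jf, pvFindJ lines f j = some jf →
      j ≤ jf ∧ pvGoB lines f j parts =
        some (PySem.Str.join " " (parts ++ (PySem.List.pyRange j (jf+1) 1).map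
          (fun k => pvPiece (PySem.List.pyGetD lines k ""))), jf)) := by
  intro f
  induction f with
  | zero => intro j parts; exact ⟨fun _ => rfl, fun jf h => by simp [pvFindJ] at h⟩
  | succ f ih =>
    intro j parts
    cases hg : PySem.List.pyGet? lines j with
    | none =>
      simp only [pvFindJ_succ, pvGoB_succ, hg]
      exact ⟨fun _ => trivial, fun jf h => by simp at h⟩
    | some s =>
      cases hl : pvLastStrip s with
      | none =>
        simp only [pvFindJ_succ, pvGoB_succ, hg, hl]
        exact ⟨fun _ => trivial, fun jf h => by simp at h⟩
      | some c =>
        simp only [pvFindJ_succ, pvGoB_succ, hg, hl]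
        by_cases hc : c = '>'
        · simp only [if_pos hc]
          refine ⟨fun h => by simp at h, fun jf h => ?_⟩
          have hjf : jf = j := by simpa using h.symm
          subst hjf
          refine ⟨le_refl _, ?_⟩
          rw [PySem.List.pyRange_one_singleton]
          simp [pvGetD_of_get? lines jf "" s hg]
        · simp only [if_neg hc]
          refine ⟨fun h => (ih (j+1) (parts ++ [pvPiece s])).1 h, fun jf h => ?_⟩
          obtain ⟨hle, heq⟩ := (ih (j+1) (parts ++ [pvPiece s])).2 jf h
          refine ⟨by omega, ?_⟩
          rw [heq]
          rw [PySem.List.pyRange_one_cons (by omega : j < jf + 1)]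
          simp [pvGetD_of_get? lines j "" s hg]

-- ===== VERDICT (by name: the statement is the Claim_ definition above) =====
theorem get_moni_stmt_from_spec : Claim_equal_get_moni_stmt_from := by
  intro lines i _hd _hp
  unfold Spec_get_moni_stmt_from get_moni_stmt_from get_moni_stmt_from_alt
  cases h : pvFindJ lines (2*lines.length+1) i with
  | none => rw [(findGo lines (2*lines.length+1) i []).1 h]; rfl
  | some j =>
    obtain ⟨hle, heq⟩ := (findGo lines (2*lines.length+1) i []).2 j h
    rw [heq]
    simp only [Option.getD_some, List.nil_append]
    rw [foldA lines j (j - i).toNat i "" rfl hle]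
    refine congrArg (fun s => (s, j)) ?_
    apply String.ext
    simp
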